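-- pv_equiv track=rewrite | github.com/modflowpy/flopy | flopy/utils/datautil.py | find_keyword
-- ===== SOURCE A (Python) =====
-- def find_keyword(arr_line, keyword_dict):
--     # convert to lower case
--     arr_line_lower = []
--     for word in arr_line:
--         # integers and floats are not keywords
--         if not DatumUtil.is_int(word) and not DatumUtil.is_float(word):
--             arr_line_lower.append(word.lower())
--     # look for constants in order of most words to least words
--     key = ""
--     for num_words in range(len(arr_line_lower), -1, -1):
--         key = tuple(arr_line_lower[0:num_words])
--         if len(key) > 0 and key in keyword_dict:
--             return key
--     return None
--
-- class DatumUtil: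
--     @staticmethod
--     def is_int(str):
--         try:
--             int(str)
--             return True
--         except TypeError:
--             return False
--         except ValueError:
--             return False
--
--     @staticmethod
--     def is_float(str):
--         try:
--             float(str)
--             return True
--         except TypeError:
--             return False
--         except ValueError:
--             return False
--
--     @staticmethod
--     def is_basic_type(obj):
--         if (
--             isinstance(obj, str)
--             or isinstance(obj, int)
--             or isinstance(obj, float)
--         ):
--             return True
--         return False
-- ===== SOURCE B (Python) =====
-- def _is_int(w):
--     try:
--         int(w)
--         return True
--     except (TypeError, ValueError):
--         return False
--
--
-- def _is_float(w):
--     try: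
--         float(w)
--         return True
--     except (TypeError, ValueError):
--         return False
--
--
-- def find_keyword(arr_line, keyword_dict):
--     # filter out numeric tokens and lowercase the rest, as the original does
--     words = [w.lower() for w in arr_line if not _is_int(w) and not _is_float(w)]
--     # single pass over the dictionary keys: keep the longest key that is a
--     # (non-empty) prefix of words
--     best = None
--     for key in keyword_dict:
--         n = len(key)
--         if n > 0 and (best is None or n > len(best)) and key == tuple(words[:n]):
--             best = key
--     return best
-- ===== Notes on version B (the rewrite author's own statement) =====
-- stated objective: faster
-- what changed: Instead of A's descending scan that re-slices the filtered word list at every prefix length and tests each slice for dict membership, B makes a single pass over the dictionary keys keeping the longest key that is a non-empty prefix of the filtered words.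
import Mathlib
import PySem

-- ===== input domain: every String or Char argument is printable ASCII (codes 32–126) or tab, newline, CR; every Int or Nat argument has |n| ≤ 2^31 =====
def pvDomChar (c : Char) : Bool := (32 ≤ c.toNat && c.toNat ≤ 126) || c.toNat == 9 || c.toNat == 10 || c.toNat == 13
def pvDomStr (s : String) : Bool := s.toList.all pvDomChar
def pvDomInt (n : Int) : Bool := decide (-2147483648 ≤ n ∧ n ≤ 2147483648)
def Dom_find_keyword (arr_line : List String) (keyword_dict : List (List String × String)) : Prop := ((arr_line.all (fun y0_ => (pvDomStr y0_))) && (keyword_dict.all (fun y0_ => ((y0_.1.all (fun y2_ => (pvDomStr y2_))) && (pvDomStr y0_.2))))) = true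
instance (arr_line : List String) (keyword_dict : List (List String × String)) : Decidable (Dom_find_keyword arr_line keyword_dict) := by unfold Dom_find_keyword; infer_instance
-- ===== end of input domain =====

-- B replaces A's descending scan over prefix lengths by a single pass over the
-- dictionary keys keeping the longest key that is a non-empty prefix of the
-- filtered words (objective: faster).

-- ===== PORT A =====

-- is_int(word): int(word) succeeds (TypeError impossible on str inputs)
def pyIsInt (s : String) : Bool := (PySem.Int.ofStr? s).isSome

-- hand-written port of CPython float(str) acceptance (no float value is needed,
-- only whether a ValueError is raised); exact on printable-ASCII strings:
-- strip whitespace, optional sign, then inf/infinity/nan (case-insensitive) or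
-- digits with single underscores between digits, optional '.', optional exponent.

-- consume the rest of a digit group: digits, with '_' allowed only between digits
def pvDigRest : List Char → List Char
  | '_' :: c :: rest => if c.isDigit then pvDigRest rest else '_' :: c :: rest
  | c :: rest => if c.isDigit then pvDigRest rest else c :: rest
  | [] => []
termination_by cs => cs.length

-- a non-empty digit group; returns the remainder, none if no leading digit
def pvParseDigits? : List Char → Option (List Char)
  | c :: rest => if c.isDigit then some (pvDigRest rest) else none
  | [] => none

-- optional exponent part then end of string
def pvParseExp : List Char → Bool
  | [] => true
  | e :: rest =>
    if e = 'e' ∨ e = 'E' then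
      let rest2 := match rest with
        | s :: r => if s = '+' ∨ s = '-' then r else s :: r
        | [] => []
      match pvParseDigits? rest2 with
      | some [] => true
      | _ => false
    else false

-- mantissa: digits [. digits?] | . digits, then exponent
def pvFloatBody (cs : List Char) : Bool :=
  match pvParseDigits? cs with
  | some rest =>
    match rest with
    | '.' :: rest2 =>
      (match pvParseDigits? rest2 with
       | some rest3 => pvParseExp rest3
       | none => pvParseExp rest2)
    | _ => pvParseExp rest
  | none =>
    match cs with
    | '.' :: rest2 =>
      (match pvParseDigits? rest2 with
       | some rest3 => pvParseExp rest3
       | none => false)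
    | _ => false

-- is_float(word): float(word) succeeds
def pyIsFloat (s : String) : Bool :=
  let cs := PySem.Chars.strip s.toList
  let cs2 := match cs with
    | c :: r => if c = '+' ∨ c = '-' then r else c :: r
    | [] => []
  let low := cs2.map PySem.Chars.lowerChar
  if low = ['i','n','f'] ∨ low = ['i','n','f','i','n','i','t','y'] ∨ low = ['n','a','n'] then
    true
  else pvFloatBody cs2

-- the word filter A applies inside its first loop
def pvKeep (w : String) : Bool := !pyIsInt w && !pyIsFloat w

-- A's second loop: for num_words in range(len, -1, -1): key = words[0:num_words]; …
def pvALoop (words : List String) (d : List (List String × String)) : List Int → Option (List String)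
  | [] => none
  | n :: rest =>
    let key := PySem.List.slice words (some 0) (some n)
    if decide (0 < key.length) && d.any (fun kv => kv.1 == key) then some key
    else pvALoop words d rest

def find_keyword (arr_line : List String) (keyword_dict : List (List String × String)) : Option (List String) :=
  let arr_line_lower := arr_line.foldl
    (fun acc word => if pvKeep word then acc ++ [PySem.Str.lower word] else acc) []
  pvALoop arr_line_lower keyword_dict
    (PySem.List.pyRange (arr_line_lower.length : Int) (-1) (-1))

-- ===== PORT B =====

-- B's own hand-written port of CPython float(str) acceptance: a deterministic
-- finite automaton run once over the characters by a fold (exact on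
-- printable-ASCII strings, like A's recursive-descent version, but a
-- different mechanism).
inductive PvFSt
  | start    -- nothing seen yet (sign already removed)
  | grp1     -- inside the integer digit group (accepting)
  | us1      -- just read '_' inside the integer group
  | dotOnly  -- read '.' with no integer digits before it
  | dotAfter -- read '.' after integer digits (accepting)
  | grp2     -- inside the fractional digit group (accepting)
  | us2      -- just read '_' inside the fractional group
  | expStart -- just read 'e'/'E'
  | expSign  -- just read the exponent's sign
  | grp3     -- inside the exponent digit group (accepting)
  | us3      -- just read '_' inside the exponent group
  | dead     -- rejected
deriving DecidableEq, Repr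

def pvFStep : PvFSt → Char → PvFSt
  | .start, c =>
    if c.isDigit then .grp1 else if c = '.' then .dotOnly else .dead
  | .grp1, c =>
    if c.isDigit then .grp1 else if c = '_' then .us1
    else if c = '.' then .dotAfter
    else if c = 'e' ∨ c = 'E' then .expStart else .dead
  | .us1, c => if c.isDigit then .grp1 else .dead
  | .dotOnly, c => if c.isDigit then .grp2 else .dead
  | .dotAfter, c =>
    if c.isDigit then .grp2
    else if c = 'e' ∨ c = 'E' then .expStart else .dead
  | .grp2, c =>
    if c.isDigit then .grp2 else if c = '_' then .us2
    else if c = 'e' ∨ c = 'E' then .expStart else .dead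
  | .us2, c => if c.isDigit then .grp2 else .dead
  | .expStart, c =>
    if c.isDigit then .grp3 else if c = '+' ∨ c = '-' then .expSign else .dead
  | .expSign, c => if c.isDigit then .grp3 else .dead
  | .grp3, c => if c.isDigit then .grp3 else if c = '_' then .us3 else .dead
  | .us3, c => if c.isDigit then .grp3 else .dead
  | .dead, _ => .dead

def pvFAccept : PvFSt → Bool
  | .grp1 | .dotAfter | .grp2 | .grp3 => true
  | _ => false

def pyIsFloatB (s : String) : Bool :=
  let cs := PySem.Chars.strip s.toList
  let cs2 := if cs.head? = some '+' ∨ cs.head? = some '-' then cs.tail else cs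
  if [['i','n','f'], ['i','n','f','i','n','i','t','y'], ['n','a','n']].contains
      (cs2.map PySem.Chars.lowerChar) then true
  else pvFAccept (cs2.foldl pvFStep .start)

-- the word filter B applies in its comprehension
def pvKeepB (w : String) : Bool := !(PySem.Int.ofStr? w).isSome && !pyIsFloatB w

def find_keyword_alt (arr_line : List String) (keyword_dict : List (List String × String)) : Option (List String) :=
  let words := (arr_line.filter pvKeepB).map PySem.Str.lower
  keyword_dict.foldl
    (fun best kv =>
      let n := kv.1.length
      if decide (0 < n) &&
         (match best with | none => true | some b => decide (b.length < n)) &&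
         (kv.1 == words.take n)
      then some kv.1 else best)
    none

-- ===== PRECONDITION & SPEC =====
def Spec_find_keyword (arr_line : List String) (keyword_dict : List (List String × String)) (out : Option (List String)) : Prop := out = find_keyword_alt arr_line keyword_dict
instance (arr_line : List String) (keyword_dict : List (List String × String)) (out : Option (List String)) : Decidable (Spec_find_keyword arr_line keyword_dict out) := by unfold Spec_find_keyword; infer_instance

-- ===== CLAIM (what is proved, stated in full; the proofs are below) =====
def Claim_equal_find_keyword : Prop := ∀ (arr_line : List String) (keyword_dict : List (List String × String)), Dom_find_keyword arr_line keyword_dict → Spec_find_keyword arr_line keyword_dict (find_keyword arr_line keyword_dict)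

-- ===== LEMMAS AND PROOFS =====

-- ---- part 1: the two float-acceptance ports agree ----

-- a pvDigRest-normal remainder: does not begin with a digit, nor with '_'
-- immediately followed by a digit
def pvNormB : List Char → Bool
  | '_' :: c :: _ => !c.isDigit
  | c :: _ => !c.isDigit
  | [] => true

theorem pv_foldl_dead : ∀ cs : List Char, cs.foldl pvFStep .dead = .dead := by
  intro cs
  induction cs with
  | nil => rfl
  | cons c rest ih => simpa [pvFStep] using ih

theorem pv_digRest_norm : ∀ cs, pvNormB (pvDigRest cs) = true := by
  intro cs
  fun_induction pvDigRest cs with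
  | case1 c rest h ih => exact ih
  | case2 c rest h => simp_all [pvNormB]
  | case3 c rest hne h ih => exact ih
  | case4 c rest hne h =>
    cases rest with
    | nil => simp_all [pvNormB]
    | cons d r =>
      by_cases hc : c = '_' <;> simp_all [pvNormB]
  | case5 => rfl

-- the digit group maps each of the three group states to itself
theorem pv_group_skip (g u : PvFSt)
    (hd : ∀ c, c.isDigit = true → pvFStep g c = g)
    (hu : pvFStep g '_' = u)
    (hud : ∀ c, c.isDigit = true → pvFStep u c = g) :
    ∀ cs : List Char, cs.foldl pvFStep g = (pvDigRest cs).foldl pvFStep g := by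
  intro cs
  fun_induction pvDigRest cs with
  | case1 c rest h ih =>
    simp only [List.foldl_cons, hu, hud c h]
    exact ih
  | case2 c rest h => rfl
  | case3 c rest hne h ih =>
    simp only [List.foldl_cons, hd c h]
    exact ih
  | case4 c rest hne h => rfl
  | case5 => rfl

-- exponent digit group: from grp3, a normal remainder is accepted iff empty
theorem pv_grp3_end : ∀ r, pvNormB r = true → pvFAccept (r.foldl pvFStep .grp3) = decide (r = []) := by
  intro r hn
  match r with
  | [] => rfl
  | '_' :: [] => rfl
  | '_' :: c :: rest =>
    have hc : c.isDigit = false := by simpa [pvNormB] using hn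
    simp [pvFStep, hc, pv_foldl_dead, pvFAccept]
  | c :: rest =>
    have hc : c.isDigit = false := by
      cases rest <;> by_cases h : c = '_' <;> simp_all [pvNormB]
    by_cases h : c = '_'
    · cases rest with
      | nil => subst h; rfl
      | cons d r2 =>
        have hd : d.isDigit = false := by subst h; simpa [pvNormB] using hn
        subst h; simp [pvFStep, hd, pv_foldl_dead, pvFAccept]
    · simp [pvFStep, hc, h, pv_foldl_dead, pvFAccept]

theorem pv_gs3 : ∀ cs : List Char, cs.foldl pvFStep .grp3 = (pvDigRest cs).foldl pvFStep .grp3 :=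
  pv_group_skip .grp3 .us3 (by intro c h; simp [pvFStep, h]) (by decide)
    (by intro c h; simp [pvFStep, h, show ¬('_'.isDigit = true) by decide])

theorem pv_gs2 : ∀ cs : List Char, cs.foldl pvFStep .grp2 = (pvDigRest cs).foldl pvFStep .grp2 :=
  pv_group_skip .grp2 .us2 (by intro c h; simp [pvFStep, h]) (by decide)
    (by intro c h; simp [pvFStep, h])

theorem pv_gs1 : ∀ cs : List Char, cs.foldl pvFStep .grp1 = (pvDigRest cs).foldl pvFStep .grp1 :=
  pv_group_skip .grp1 .us1 (by intro c h; simp [pvFStep, h]) (by decide)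
    (by intro c h; simp [pvFStep, h])

theorem pv_exp_group : ∀ (d : Char) (r0 : List Char), d.isDigit = true →
    (match pvParseDigits? (d :: r0) with | some [] => true | _ => false)
      = pvFAccept (r0.foldl pvFStep .grp3) := by
  intro d r0 hd
  rw [pv_gs3, pv_grp3_end _ (pv_digRest_norm r0)]
  simp only [pvParseDigits?, if_pos hd]
  cases h : pvDigRest r0 <;> simp [h]

theorem pv_expdig (x : PvFSt) (r2 : List Char)
    (h1 : ∀ c, c.isDigit = true → pvFStep x c = .grp3)
    (h2 : ∀ c, c.isDigit = false → pvFStep x c = .dead)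
    (h3 : pvFAccept x = false) :
    (match pvParseDigits? r2 with | some [] => true | _ => false)
      = pvFAccept (r2.foldl pvFStep x) := by
  cases r2 with
  | nil => simp [pvParseDigits?, h3]
  | cons d r0 =>
    by_cases hd : d.isDigit
    · rw [List.foldl_cons, h1 d hd]
      exact pv_exp_group d r0 hd
    · have hdf : d.isDigit = false := by simpa using hd
      rw [List.foldl_cons, h2 d hdf, pv_foldl_dead]
      simp [pvParseDigits?, hdf, pvFAccept]

theorem pv_exp_part : ∀ (e : Char) (rest : List Char), (e = 'e' ∨ e = 'E') →
    pvParseExp (e :: rest) = pvFAccept (rest.foldl pvFStep .expStart) := by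
  intro e rest he
  have hL : pvParseExp (e :: rest)
      = (match pvParseDigits? (match rest with
          | s :: r => if s = '+' ∨ s = '-' then r else s :: r
          | [] => []) with
         | some [] => true | _ => false) := by
    simp [pvParseExp, he]
  rw [hL]
  cases rest with
  | nil => simp [pvParseDigits?, pvFAccept]
  | cons s r =>
    by_cases hs : s = '+' ∨ s = '-'
    · have hsd : s.isDigit = false := by rcases hs with h | h <;> subst h <;> decide
      simp only [if_pos hs]
      rw [List.foldl_cons, show pvFStep .expStart s = .expSign by simp [pvFStep, hsd, hs]]
      exact pv_expdig .expSign r (by intro c h; simp [pvFStep, h])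
        (by intro c h; simp [pvFStep, h]) rfl
    · simp only [if_neg hs]
      by_cases hd : s.isDigit
      · rw [List.foldl_cons, show pvFStep .expStart s = .grp3 by simp [pvFStep, hd]]
        exact pv_exp_group s r hd
      · have hdf : s.isDigit = false := by simpa using hd
        rw [List.foldl_cons, show pvFStep .expStart s = .dead by simp [pvFStep, hdf, hs],
          pv_foldl_dead]
        simp [pvParseDigits?, hdf, pvFAccept]

theorem pv_tail_grp2 : ∀ r, pvNormB r = true → pvParseExp r = pvFAccept (r.foldl pvFStep .grp2) := by
  intro r hn
  cases r with
  | nil => rfl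
  | cons c rest =>
    by_cases he : c = 'e' ∨ c = 'E'
    · rw [pv_exp_part c rest he]
      rcases he with h | h <;> subst h <;> simp [pvFStep]
    · have hcd : c.isDigit = false := by
        cases rest <;> by_cases h : c = '_' <;> simp_all [pvNormB]
      by_cases hu : c = '_'
      · subst hu
        cases rest with
        | nil => simp [pvParseExp, pvFStep, pvFAccept]
        | cons d r2 =>
          have hd : d.isDigit = false := by simpa [pvNormB] using hn
          simp [pvParseExp, pvFStep, hd, pv_foldl_dead, pvFAccept]
      · simp [pvParseExp, he, pvFStep, hcd, hu, pv_foldl_dead, pvFAccept]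

theorem pv_tail_dotAfter : ∀ rest2,
    (match pvParseDigits? rest2 with
     | some rest3 => pvParseExp rest3
     | none => pvParseExp rest2)
      = pvFAccept (rest2.foldl pvFStep .dotAfter) := by
  intro rest2
  cases rest2 with
  | nil => rfl
  | cons d r0 =>
    by_cases hd : d.isDigit
    · simp only [pvParseDigits?, if_pos hd]
      rw [List.foldl_cons, show pvFStep .dotAfter d = .grp2 by simp [pvFStep, hd],
        pv_gs2, ← pv_tail_grp2 _ (pv_digRest_norm r0)]
    · simp only [pvParseDigits?, if_neg hd]
      by_cases he : d = 'e' ∨ d = 'E'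
      · rw [pv_exp_part d r0 he, List.foldl_cons,
          show pvFStep .dotAfter d = .expStart by simp [pvFStep, hd, he]]
      · simp [pvParseExp, he, pvFStep, hd, pv_foldl_dead, pvFAccept]

theorem pv_tail_grp1 : ∀ r, pvNormB r = true →
    (match r with
     | '.' :: rest2 =>
       (match pvParseDigits? rest2 with
        | some rest3 => pvParseExp rest3
        | none => pvParseExp rest2)
     | _ => pvParseExp r)
      = pvFAccept (r.foldl pvFStep .grp1) := by
  intro r hn
  cases r with
  | nil => rfl
  | cons c rest =>
    by_cases hdot : c = '.'
    · subst hdot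
      rw [List.foldl_cons, show pvFStep .grp1 '.' = .dotAfter by decide]
      exact pv_tail_dotAfter rest
    · have hcd : c.isDigit = false := by
        cases rest <;> by_cases h : c = '_' <;> simp_all [pvNormB]
      have harm : (match c :: rest with
          | '.' :: rest2 =>
            (match pvParseDigits? rest2 with
             | some rest3 => pvParseExp rest3
             | none => pvParseExp rest2)
          | _ => pvParseExp (c :: rest)) = pvParseExp (c :: rest) := by
        cases rest <;> simp_all
      rw [harm]
      by_cases he : c = 'e' ∨ c = 'E'
      · have hu : ¬ c = '_' := by rcases he with h | h <;> subst h <;> decide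
        rw [pv_exp_part c rest he, List.foldl_cons,
          show pvFStep .grp1 c = .expStart by simp [pvFStep, hcd, hdot, hu, he]]
      · by_cases hu : c = '_'
        · subst hu
          cases rest with
          | nil => simp [pvParseExp, pvFStep, pvFAccept]
          | cons d r2 =>
            have hd : d.isDigit = false := by simpa [pvNormB] using hn
            simp [pvParseExp, pvFStep, hd, pv_foldl_dead, pvFAccept]
        · simp [pvParseExp, he, pvFStep, hcd, hu, hdot, pv_foldl_dead, pvFAccept]

theorem pv_body_eq : ∀ cs, pvFloatBody cs = pvFAccept (cs.foldl pvFStep .start) := by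
  intro cs
  cases cs with
  | nil => rfl
  | cons c rest =>
    by_cases hd : c.isDigit
    · have hbody : pvFloatBody (c :: rest)
          = (match pvDigRest rest with
             | '.' :: rest2 =>
               (match pvParseDigits? rest2 with
                | some rest3 => pvParseExp rest3
                | none => pvParseExp rest2)
             | _ => pvParseExp (pvDigRest rest)) := by
        simp [pvFloatBody, pvParseDigits?, hd]
      rw [hbody, pv_tail_grp1 _ (pv_digRest_norm rest), List.foldl_cons,
        show pvFStep .start c = .grp1 by simp [pvFStep, hd]]
      exact (congrArg pvFAccept (pv_gs1 rest)).symm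
    · by_cases hdot : c = '.'
      · subst hdot
        rw [List.foldl_cons, show pvFStep .start '.' = .dotOnly by decide]
        simp only [pvFloatBody, pvParseDigits?, if_neg hd]
        cases rest with
        | nil => rfl
        | cons d r0 =>
          by_cases hd2 : d.isDigit
          · simp only [pvParseDigits?, if_pos hd2]
            rw [List.foldl_cons, show pvFStep .dotOnly d = .grp2 by simp [pvFStep, hd2],
              pv_gs2, ← pv_tail_grp2 _ (pv_digRest_norm r0)]
          · simp [pvParseDigits?, hd2, pvFStep, pv_foldl_dead, pvFAccept]
      · have harm : pvFloatBody (c :: rest) = false := by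
          cases rest <;> simp_all [pvFloatBody, pvParseDigits?]
        rw [harm]
        simp [pvFStep, hd, hdot, pv_foldl_dead, pvFAccept]

theorem pv_core (cs2 : List Char) :
    (if [['i','n','f'], ['i','n','f','i','n','i','t','y'], ['n','a','n']].contains
        (cs2.map PySem.Chars.lowerChar) then true
     else pvFAccept (cs2.foldl pvFStep .start))
    = (if cs2.map PySem.Chars.lowerChar = ['i','n','f']
          ∨ cs2.map PySem.Chars.lowerChar = ['i','n','f','i','n','i','t','y']
          ∨ cs2.map PySem.Chars.lowerChar = ['n','a','n'] then true
     else pvFloatBody cs2) := by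
  by_cases hm : cs2.map PySem.Chars.lowerChar = ['i','n','f']
      ∨ cs2.map PySem.Chars.lowerChar = ['i','n','f','i','n','i','t','y']
      ∨ cs2.map PySem.Chars.lowerChar = ['n','a','n']
  · have h1 : ([['i','n','f'], ['i','n','f','i','n','i','t','y'], ['n','a','n']].contains
        (cs2.map PySem.Chars.lowerChar)) = true := by
      rcases hm with h | h | h <;> simp [h]
    simp [h1, hm]
  · have h1 : ([['i','n','f'], ['i','n','f','i','n','i','t','y'], ['n','a','n']].contains
        (cs2.map PySem.Chars.lowerChar)) = false := by
      rw [Bool.eq_false_iff]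
      intro hc
      exact hm (by simpa using hc)
    simp [h1, hm, pv_body_eq]

theorem pyIsFloatB_eq (s : String) : pyIsFloatB s = pyIsFloat s := by
  unfold pyIsFloatB pyIsFloat
  have hsign : (if (PySem.Chars.strip s.toList).head? = some '+'
        ∨ (PySem.Chars.strip s.toList).head? = some '-'
      then (PySem.Chars.strip s.toList).tail else PySem.Chars.strip s.toList)
      = (match PySem.Chars.strip s.toList with
         | c :: r => if c = '+' ∨ c = '-' then r else c :: r
         | [] => []) := by
    cases h : PySem.Chars.strip s.toList with
    | nil => simp
    | cons c r => by_cases hc : c = '+' ∨ c = '-' <;> simp [hc]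
  simp only [hsign]
  exact pv_core _

theorem pvKeepB_eq : pvKeepB = pvKeep := by
  funext w
  unfold pvKeepB pvKeep pyIsInt
  rw [pyIsFloatB_eq]

-- ---- part 2: A's descending scan equals B's fold over the keys ----

-- the Bool condition of A's scan at prefix length n
def pvMatched (words : List String) (d : List (List String × String)) (n : Nat) : Bool :=
  decide (0 < (words.take n).length) && d.any (fun kv => kv.1 == words.take n)

-- a dictionary key that is a non-empty prefix of words
def pvOk (words : List String) (kv : List String × String) : Bool :=
  decide (0 < kv.1.length) && (kv.1 == words.take kv.1.length)

-- length-only image of B's fold (0 encodes "no key kept yet")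
def pvG (words : List String) : Nat → List (List String × String) → Nat
  | cur, [] => cur
  | cur, kv :: l =>
    if pvOk words kv && decide (cur < kv.1.length) then pvG words kv.1.length l
    else pvG words cur l

-- length-only image of A's descending scan
def pvMM (words : List String) (d : List (List String × String)) : Nat → Nat
  | 0 => 0
  | n + 1 => if pvMatched words d (n + 1) then n + 1 else pvMM words d n

-- decode a length back to A's / B's Option result
def pvEnc (words : List String) (n : Nat) : Option (List String) :=
  if n = 0 then none else some (words.take n)

theorem pvALoop_eq_mm (words : List String) (d : List (List String × String)) :
    ∀ N : Nat, pvALoop words d (PySem.List.pyRange (N : Int) (-1) (-1)) = pvEnc words (pvMM words d N) := by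
  intro N
  induction N with
  | zero =>
    rw [PySem.List.pyRange_neg_one_cons (by norm_num), PySem.List.pyRange_neg_one_eq_nil (by norm_num)]
    have h0 : PySem.List.slice words (some 0) (some 0) = ([] : List String) := by
      rw [show (0 : Int) = ((0 : Nat) : Int) by norm_num, PySem.List.slice_natCast]
      simp
    simp [pvALoop, pvMM, pvEnc, h0]
  | succ n ih =>
    rw [show ((n + 1 : Nat) : Int) = ((n : Int) + 1) by push_cast; ring]
    rw [PySem.List.pyRange_neg_one_cons (by omega)]
    rw [show ((n : Int) + 1 - 1) = ((n : Nat) : Int) by ring]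
    simp only [pvALoop]
    rw [show PySem.List.slice words (some 0) (some ((n : Int) + 1)) = words.take (n + 1) by
      rw [show ((n : Int) + 1) = ((n + 1 : Nat) : Int) by push_cast; ring]
      rw [show (0 : Int) = ((0 : Nat) : Int) by norm_num, PySem.List.slice_natCast]
      simp]
    simp only [pvMM, pvMatched]
    by_cases h : (decide (0 < (words.take (n + 1)).length) && d.any fun kv => kv.1 == words.take (n + 1)) = true
    · rw [if_pos h, if_pos h]
      simp [pvEnc]
    · rw [if_neg h, if_neg h]
      exact ih

theorem pvBFold_g (words : List String) :
    ∀ (l : List (List String × String)) (cur : Nat), cur ≤ words.length →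
      l.foldl (fun best kv =>
        if decide (0 < kv.1.length) &&
           (match best with | none => true | some b => decide (b.length < kv.1.length)) &&
           (kv.1 == words.take kv.1.length)
        then some kv.1 else best) (pvEnc words cur)
      = pvEnc words (pvG words cur l) := by
  intro l
  induction l with
  | nil => intro cur _; rfl
  | cons kv l ih =>
    intro cur hcur
    simp only [List.foldl_cons, pvG]
    have hlen : (words.take cur).length = cur := by simp; omega
    have key : (decide (0 < kv.1.length) &&
         (match pvEnc words cur with | none => true | some b => decide (b.length < kv.1.length)) &&
         (kv.1 == words.take kv.1.length))
        = (pvOk words kv && decide (cur < kv.1.length)) := by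
      by_cases h0 : cur = 0
      · subst h0
        unfold pvOk pvEnc
        cases hd : decide (0 < kv.1.length) <;>
          cases hb : (kv.1 == words.take kv.1.length) <;> simp [hd, hb]
      · have henc : pvEnc words cur = some (words.take cur) := by
          unfold pvEnc; rw [if_neg h0]
        rw [henc]
        unfold pvOk
        simp only [hlen]
        rw [Bool.and_right_comm]
    rw [key]
    by_cases hc : (pvOk words kv && decide (cur < kv.1.length)) = true
    · rw [if_pos hc, if_pos hc]
      rw [Bool.and_eq_true] at hc
      have hok := hc.1
      unfold pvOk at hok
      rw [Bool.and_eq_true] at hok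
      have hn : 0 < kv.1.length := of_decide_eq_true hok.1
      have heq : kv.1 = words.take kv.1.length := by
        have := hok.2; simpa using this
      have hle : kv.1.length ≤ words.length := by
        have h1 : kv.1.length = (words.take kv.1.length).length := by rw [← heq]
        simp at h1; omega
      have henc : some kv.1 = pvEnc words kv.1.length := by
        unfold pvEnc
        rw [if_neg (by omega), ← heq]
      rw [henc]
      exact ih kv.1.length hle
    · rw [if_neg hc, if_neg hc]
      exact ih cur hcur

theorem pv_mm_le (words : List String) (d : List (List String × String)) :
    ∀ N, pvMM words d N ≤ N := by
  intro N
  induction N with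
  | zero => simp [pvMM]
  | succ n ih => unfold pvMM; split <;> omega

theorem pv_mm_matched (words : List String) (d : List (List String × String)) :
    ∀ N, pvMM words d N = 0 ∨ pvMatched words d (pvMM words d N) = true := by
  intro N
  induction N with
  | zero => left; rfl
  | succ n ih =>
    unfold pvMM
    split
    · right; assumption
    · exact ih

theorem pv_le_mm (words : List String) (d : List (List String × String)) :
    ∀ N k, k ≤ N → pvMatched words d k = true → k ≤ pvMM words d N := by
  intro N
  induction N with
  | zero => intro k hk _; omega
  | succ n ih =>
    intro k hk hm
    unfold pvMM
    split
    · omega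
    · rename_i hno
      rcases Nat.lt_or_ge k (n + 1) with h | h
      · exact ih k (by omega) hm
      · have hk1 : k = n + 1 := by omega
        rw [hk1] at hm
        exact absurd hm hno

theorem pv_le_g (words : List String) :
    ∀ (l : List (List String × String)) (cur : Nat), cur ≤ pvG words cur l := by
  intro l
  induction l with
  | nil => intro cur; simp [pvG]
  | cons kv l ih =>
    intro cur
    unfold pvG
    split
    · rename_i h
      rw [Bool.and_eq_true] at h
      have := of_decide_eq_true h.2
      calc cur ≤ kv.1.length := by omega
        _ ≤ pvG words kv.1.length l := ih _
    · exact ih cur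

theorem pv_g_matched (words : List String) :
    ∀ (l : List (List String × String)) (cur : Nat),
      pvG words cur l = cur ∨ ∃ kv ∈ l, pvOk words kv = true ∧ kv.1.length = pvG words cur l := by
  intro l
  induction l with
  | nil => intro cur; left; rfl
  | cons kv l ih =>
    intro cur
    unfold pvG
    split
    · rename_i h
      rw [Bool.and_eq_true] at h
      rcases ih kv.1.length with h1 | ⟨kv', hmem, hok, hlen⟩
      · right; exact ⟨kv, by simp, h.1, by rw [h1]⟩
      · right; exact ⟨kv', by simp [hmem], hok, hlen⟩
    · rcases ih cur with h1 | ⟨kv', hmem, hok, hlen⟩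
      · left; exact h1
      · right; exact ⟨kv', by simp [hmem], hok, hlen⟩

theorem pv_g_ub (words : List String) :
    ∀ (l : List (List String × String)) (cur : Nat) (kv : List String × String),
      kv ∈ l → pvOk words kv = true → kv.1.length ≤ pvG words cur l := by
  intro l
  induction l with
  | nil => intro cur kv h; simp at h
  | cons kv0 l ih =>
    intro cur kv hmem hok
    rcases List.mem_cons.mp hmem with h | h
    · subst h
      unfold pvG
      by_cases hlt : cur < kv.1.length
      · rw [if_pos (by simp [hok, hlt])]
        exact pv_le_g words l _
      · rw [if_neg (by simp [hlt])]
        calc kv.1.length ≤ cur := by omega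
          _ ≤ pvG words cur l := pv_le_g words l cur
    · unfold pvG
      split
      · exact ih _ kv h hok
      · exact ih _ kv h hok

theorem pv_ok_matched (words : List String) (d : List (List String × String))
    (kv : List String × String) (hmem : kv ∈ d) (hok : pvOk words kv = true) :
    pvMatched words d kv.1.length = true ∧ kv.1.length ≤ words.length := by
  unfold pvOk at hok
  simp only [Bool.and_eq_true, decide_eq_true_eq, beq_iff_eq] at hok
  obtain ⟨hn, heq⟩ := hok
  have hle : kv.1.length ≤ words.length := by
    have h1 : kv.1.length = (words.take kv.1.length).length := by rw [← heq]
    simp at h1; omega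
  refine ⟨?_, hle⟩
  unfold pvMatched
  simp only [Bool.and_eq_true, decide_eq_true_eq, List.any_eq_true, beq_iff_eq]
  exact ⟨by rw [← heq]; exact hn, kv, hmem, heq⟩

theorem pv_matched_ok (words : List String) (d : List (List String × String))
    (k : Nat) (hk : k ≤ words.length) (hm : pvMatched words d k = true) :
    ∃ kv ∈ d, pvOk words kv = true ∧ kv.1.length = k := by
  unfold pvMatched at hm
  simp only [Bool.and_eq_true, decide_eq_true_eq, List.any_eq_true, beq_iff_eq] at hm
  obtain ⟨hpos, kv, hmem, heq⟩ := hm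
  have hlen : kv.1.length = k := by rw [heq]; simp; omega
  refine ⟨kv, hmem, ?_, hlen⟩
  unfold pvOk
  simp only [Bool.and_eq_true, decide_eq_true_eq, beq_iff_eq]
  refine ⟨by rw [hlen]; simp at hpos; omega, by rw [hlen]; exact heq⟩

theorem pv_g_eq_mm (words : List String) (d : List (List String × String)) :
    pvG words 0 d = pvMM words d words.length := by
  apply Nat.le_antisymm
  · rcases pv_g_matched words d 0 with h | ⟨kv, hmem, hok, hlen⟩
    · rw [h]; exact Nat.zero_le _
    · obtain ⟨hm, hle⟩ := pv_ok_matched words d kv hmem hok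
      rw [← hlen]
      exact pv_le_mm words d words.length kv.1.length hle hm
  · rcases pv_mm_matched words d words.length with h | h
    · rw [h]; exact Nat.zero_le _
    · obtain ⟨kv, hmem, hok, hlen⟩ :=
        pv_matched_ok words d _ (pv_mm_le words d words.length) h
      rw [← hlen]
      exact pv_g_ub words d 0 kv hmem hok

-- ===== VERDICT (by name: the statement is the Claim_ definition above) =====
theorem find_keyword_spec : Claim_equal_find_keyword := by
  intro arr_line keyword_dict _
  unfold Spec_find_keyword
  simp only [find_keyword, find_keyword_alt, pvKeepB_eq]
  rw [PySem.List.foldl_append_if pvKeep PySem.Str.lower arr_line, List.nil_append]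
  rw [pvALoop_eq_mm ((arr_line.filter pvKeep).map PySem.Str.lower) keyword_dict]
  have hB := pvBFold_g ((arr_line.filter pvKeep).map PySem.Str.lower) keyword_dict 0 (Nat.zero_le _)
  rw [show pvEnc ((arr_line.filter pvKeep).map PySem.Str.lower) 0 = none from rfl] at hB
  rw [← pv_g_eq_mm]
  exact hB.symm
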